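-- pv_equiv track=rewrite | github.com/BluMonday/AoC_Project_2021 | 2024/d9/p2.py | find_all_blanks
-- ===== SOURCE A (Python) =====
-- from collections import namedtuple
--
-- class File(namedtuple('File', 'start stop')):
--     def __str__(self):
--         return f'{self.start},{self.stop},len={self.stop - self.start + 1}'
--     def length(self):
--         return self.stop - self.start + 1
--
-- def find_all_blanks(disk):
--     blanks = []
--     in_blank = False
--     start_idx = 0
--     for i in range(len(disk)):
--         if disk[i] == '.' and not in_blank:
--             in_blank = True
--             start_idx = i
--         elif disk[i] == '.' and in_blank:
--             continue
--         elif disk[i] != '.' and in_blank: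
--             in_blank = False
--             end_idx = i-1
--             blanks.append(File(start_idx, end_idx))
--         elif disk[i] != '.' and not in_blank:
--             continue
--     return blanks
-- ===== SOURCE B (Python) =====
-- from collections import namedtuple
--
-- class File(namedtuple('File', 'start stop')):
--     def __str__(self):
--         return f'{self.start},{self.stop},len={self.stop - self.start + 1}'
--     def length(self):
--         return self.stop - self.start + 1
--
-- def find_all_blanks(disk):
--     # boundary detection: a run starts where a '.' follows a non-'.', and ends
--     # where a '.' is followed by a non-'.'; zip truncation drops a trailing run.
--     starts = [i for i, (prev, cur) in enumerate(zip(['x'] + disk, disk))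
--               if cur == '.' and prev != '.']
--     ends = [i for i, (cur, nxt) in enumerate(zip(disk, disk[1:]))
--             if cur == '.' and nxt != '.']
--     return [File(s, e) for s, e in zip(starts, ends)]
-- ===== Notes on version B (the rewrite author's own statement) =====
-- stated objective: idiomatic
-- what changed: The explicit state-machine scan (in_blank flag, start_idx) is replaced by boundary detection: zip each character with its neighbour to collect run starts ('.' after a non-'.') and run ends ('.' before a non-'.') in two comprehensions, then pair them with zip, whose truncation drops a trailing unterminated run exactly as A does.
import Mathlib
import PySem

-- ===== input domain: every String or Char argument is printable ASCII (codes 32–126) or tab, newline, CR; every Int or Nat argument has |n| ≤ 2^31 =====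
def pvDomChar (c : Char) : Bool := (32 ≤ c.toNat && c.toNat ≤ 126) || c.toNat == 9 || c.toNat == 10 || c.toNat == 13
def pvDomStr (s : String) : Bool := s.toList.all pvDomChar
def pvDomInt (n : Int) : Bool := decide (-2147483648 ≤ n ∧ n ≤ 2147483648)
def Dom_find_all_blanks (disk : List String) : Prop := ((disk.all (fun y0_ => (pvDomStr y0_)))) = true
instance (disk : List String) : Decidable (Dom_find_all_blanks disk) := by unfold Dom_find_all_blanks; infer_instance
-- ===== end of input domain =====

-- B replaces A's state-machine scan by neighbour-pair boundary detection (idiomatic, same cost).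

-- ===== PORT A =====
-- state-machine scan over range(len(disk)); state = (blanks, in_blank, start_idx)
def find_all_blanks (disk : List String) : List (Int × Int) :=
  (((PySem.List.pyRange 0 (PySem.List.len disk) 1).foldl
    (fun (s : List (Int × Int) × Bool × Int) i =>
      let c := PySem.List.pyGetD disk i ""
      if c == "." && !s.2.1 then (s.1, true, i)
      else if c == "." && s.2.1 then s
      else if c != "." && s.2.1 then (s.1 ++ [(s.2.2, i - 1)], false, s.2.2)
      else s)
    ([], false, 0)) : List (Int × Int) × Bool × Int).1

-- ===== PORT B =====
-- boundary detection: run starts = '.' after a non-'.', run ends = '.' before a non-'.'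
def find_all_blanks_alt (disk : List String) : List (Int × Int) :=
  let starts := ((PySem.List.enumerate (List.zip ("x" :: disk) disk) 0).filter
      (fun p => p.2.2 == "." && p.2.1 != ".")).map (·.1)
  let ends := ((PySem.List.enumerate (List.zip disk (PySem.List.slice disk (some 1) none)) 0).filter
      (fun p => p.2.1 == "." && p.2.2 != ".")).map (·.1)
  List.zip starts ends

-- ===== PRECONDITION & SPEC =====
def Spec_find_all_blanks (disk : List String) (out : List (Int × Int)) : Prop := out = find_all_blanks_alt disk
instance (disk : List String) (out : List (Int × Int)) : Decidable (Spec_find_all_blanks disk out) := by unfold Spec_find_all_blanks; infer_instance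

-- ===== CLAIM (what is proved, stated in full; the proofs are below) =====
def Claim_equal_find_all_blanks : Prop := ∀ (disk : List String), Dom_find_all_blanks disk → Spec_find_all_blanks disk (find_all_blanks disk)

-- ===== LEMMAS AND PROOFS =====

-- A's loop as structural recursion on the list (i = index of the head)
def goA : List String → Int → Bool → Int → List (Int × Int)
  | [], _, _, _ => []
  | c :: r, i, inb, st =>
    if c == "." && !inb then goA r (i + 1) true i
    else if c == "." && inb then goA r (i + 1) inb st
    else if c != "." && inb then (st, i - 1) :: goA r (i + 1) false st
    else goA r (i + 1) inb st

-- run-start positions of a suffix; pd = "previous char was '.'"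
def startsP : List String → Int → Bool → List Int
  | [], _, _ => []
  | c :: r, i, pd => (if c == "." && !pd then [i] else []) ++ startsP r (i + 1) (c == ".")

-- run-end positions of a suffix; pd = "previous char was '.'"
def endsP : List String → Int → Bool → List Int
  | [], _, _ => []
  | c :: r, i, pd => (if pd && c != "." then [i - 1] else []) ++ endsP r (i + 1) (c == ".")

-- fold over enumerate = goA
theorem foldl_enum_goA (l : List String) : ∀ (i : Int) (acc : List (Int × Int)) (inb : Bool) (st : Int),
    (((PySem.List.enumerate l i).foldl
      (fun (s : List (Int × Int) × Bool × Int) (p : Int × String) =>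
        if p.2 == "." && !s.2.1 then (s.1, true, p.1)
        else if p.2 == "." && s.2.1 then s
        else if p.2 != "." && s.2.1 then (s.1 ++ [(s.2.2, p.1 - 1)], false, s.2.2)
        else s)
      (acc, inb, st)) : List (Int × Int) × Bool × Int).1 = acc ++ goA l i inb st := by
  induction l with
  | nil => intro i acc inb st; simp [PySem.List.enumerate_nil, goA]
  | cons c r ih =>
    intro i acc inb st
    rw [PySem.List.enumerate_cons]
    simp only [List.foldl_cons, goA]
    by_cases h : c == "." <;>
      have h' : (c != ".") = (!(c == ".")) := rfl <;>
      cases inb <;>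
      simp only [h, h', Bool.not_false, Bool.not_true, Bool.and_false, Bool.and_true,
        Bool.and_self, ite_true, ite_false, Bool.false_eq_true] <;>
      first
        | exact ih _ _ _ _
        | (rw [ih]; simp)

-- goA = zip of run starts and run ends
theorem goA_zip (t : List String) : ∀ (i st : Int),
    goA t i true st = List.zip (st :: startsP t i true) (endsP t i true) ∧
    goA t i false st = List.zip (startsP t i false) (endsP t i false) := by
  induction t with
  | nil => intro i st; simp [goA, startsP, endsP]
  | cons c r ih =>
    intro i st
    by_cases h : c = "."
    · constructor
      · simp [goA, startsP, endsP, h, (ih (i + 1) st).1]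
      · simp [goA, startsP, endsP, h, (ih (i + 1) i).1]
    · have hb : (c == ".") = false := by simp [h]
      constructor
      · simp [goA, startsP, endsP, h, hb, (ih (i + 1) st).2]
      · simp [goA, startsP, endsP, hb, (ih (i + 1) st).2]

-- B's starts comprehension = startsP
theorem starts_eq (l : List String) : ∀ (prev : String) (i : Int),
    ((PySem.List.enumerate (List.zip (prev :: l) l) i).filter
      (fun p => p.2.2 == "." && p.2.1 != ".")).map (·.1) = startsP l i (prev == ".") := by
  induction l with
  | nil => intro prev i; simp [PySem.List.enumerate_nil, startsP]
  | cons c r ih =>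
    intro prev i
    rw [show List.zip (prev :: c :: r) (c :: r) = (prev, c) :: List.zip (c :: r) r from rfl,
        PySem.List.enumerate_cons, List.filter_cons]
    have hp' : (prev != ".") = (!(prev == ".")) := rfl
    by_cases h : c == "." <;> by_cases hp : prev == "." <;>
      simp only [h, hp, hp', startsP, Bool.not_true, Bool.not_false, Bool.and_false,
        Bool.and_true, ite_true, ite_false, Bool.false_eq_true, List.map_cons,
        List.nil_append, List.cons_append, ih c (i + 1)]

-- B's ends comprehension = endsP (index shift: endsP r (i+1) (c == ".") emits i when c = '.')
theorem ends_eq (l : List String) : ∀ (i : Int),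
    ((PySem.List.enumerate (List.zip l l.tail) i).filter
      (fun p => p.2.1 == "." && p.2.2 != ".")).map (·.1) = endsP l i false := by
  induction l with
  | nil => intro i; simp [PySem.List.enumerate_nil, endsP]
  | cons c r ih =>
    intro i
    cases r with
    | nil => simp [PySem.List.enumerate_nil, endsP]
    | cons d r' =>
      rw [show List.zip (c :: d :: r') (c :: d :: r').tail = (c, d) :: List.zip (d :: r') r' from rfl,
          PySem.List.enumerate_cons, List.filter_cons]
      have hrec := ih (i + 1)
      rw [show (d :: r').tail = r' from rfl] at hrec
      have hd' : (d != ".") = (!(d == ".")) := rfl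
      have hc' : (c != ".") = (!(c == ".")) := rfl
      by_cases h : c == "." <;> by_cases hd : d == "." <;>
        [skip; skip; skip; skip] <;>
      · simp [endsP, h, hd, hd', hc'] at hrec ⊢
        simp [hrec]

-- ===== VERDICT (by name: the statement is the Claim_ definition above) =====
theorem find_all_blanks_spec : Claim_equal_find_all_blanks := by
  intro disk _
  show find_all_blanks disk = find_all_blanks_alt disk
  have h1 : find_all_blanks disk =
      (((PySem.List.enumerate disk 0).foldl
        (fun (s : List (Int × Int) × Bool × Int) (p : Int × String) =>
          if p.2 == "." && !s.2.1 then (s.1, true, p.1)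
          else if p.2 == "." && s.2.1 then s
          else if p.2 != "." && s.2.1 then (s.1 ++ [(s.2.2, p.1 - 1)], false, s.2.2)
          else s)
        ([], false, 0)) : List (Int × Int) × Bool × Int).1 := by
    unfold find_all_blanks
    rw [PySem.List.enumerate_eq_map_pyRange (d := ""), List.foldl_map]
  rw [h1, foldl_enum_goA, List.nil_append]
  unfold find_all_blanks_alt
  rw [PySem.List.slice_from_one, starts_eq, ends_eq]
  have hx : ("x" == ".") = false := by decide
  rw [hx]
  exact (goA_zip disk 0 0).2
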